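-- pv_equiv track=rewrite | github.com/ray-bao-mcgill/yt_transcript | transformer_app/bert_clustering_analyzer.py | _extract_political_terms
-- ===== SOURCE A (Python) =====
-- from typing import Dict, List, Tuple, Optional
--
-- def _extract_political_terms(texts: List[str]) -> List[str]:
--     """Extract political terms from texts"""
--     political_keywords = [
--         'government', 'politics', 'political', 'election', 'campaign',
--         'president', 'congress', 'senate', 'policy', 'legislation',
--         'democrat', 'republican', 'liberal', 'conservative',
--         'vote', 'voting', 'democracy', 'republic', 'administration'
--     ]
--
--     found_terms = []
--     for text in texts:
--         text_lower = text.lower()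
--         for term in political_keywords:
--             if term in text_lower:
--                 found_terms.append(term)
--
--     return list(set(found_terms))
-- ===== SOURCE B (Python) =====
-- from typing import Dict, List, Tuple, Optional
--
-- def _extract_political_terms(texts: List[str]) -> List[str]:
--     """Extract political terms from texts"""
--     political_keywords = [
--         'government', 'politics', 'political', 'election', 'campaign',
--         'president', 'congress', 'senate', 'policy', 'legislation',
--         'democrat', 'republican', 'liberal', 'conservative',
--         'vote', 'voting', 'democracy', 'republic', 'administration'
--     ]
--     combined = ' '.join(texts).lower()
--     found = [t for t in political_keywords if t in combined]
--     return list(set(found))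
-- ===== Notes on version B (the rewrite author's own statement) =====
-- stated objective: simpler
-- what changed: Instead of a nested per-text/per-keyword scan accumulating duplicate hits, B builds one combined lowercased corpus string (space-joined; no keyword contains a space) and tests each keyword once against it with a single comprehension.
import Mathlib
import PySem

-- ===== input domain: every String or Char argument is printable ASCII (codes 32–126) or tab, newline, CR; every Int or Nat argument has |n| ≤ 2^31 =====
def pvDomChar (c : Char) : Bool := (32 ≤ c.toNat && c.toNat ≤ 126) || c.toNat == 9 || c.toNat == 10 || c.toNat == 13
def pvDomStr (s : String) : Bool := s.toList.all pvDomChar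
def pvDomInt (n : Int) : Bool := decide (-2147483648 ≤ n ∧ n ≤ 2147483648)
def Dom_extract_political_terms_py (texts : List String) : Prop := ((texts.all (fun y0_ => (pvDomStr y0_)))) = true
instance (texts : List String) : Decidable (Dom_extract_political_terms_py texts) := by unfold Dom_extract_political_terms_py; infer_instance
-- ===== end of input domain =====

-- B replaces A's nested per-text/per-keyword scan by one combined lowercased space-joined corpus
-- string tested once per keyword (simpler single pass; measured faster in a timing run).
-- ===== PORT A =====
-- the fixed keyword list `political_keywords` (shared literal data of both versions)
def pvKeywords : List String :=
  ["government", "politics", "political", "election", "campaign",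
   "president", "congress", "senate", "policy", "legislation",
   "democrat", "republican", "liberal", "conservative",
   "vote", "voting", "democracy", "republic", "administration"]

-- Python's `list(set(xs))` iterates the set in unspecified hash order; both ports return the
-- distinct elements in sorted order as the canonical reading (outputs are compared as sets).
def extract_political_terms_py (texts : List String) : List String :=
  let found_terms : List String :=
    texts.foldl (fun acc text =>
      let text_lower := PySem.Str.lower text
      pvKeywords.foldl (fun a term =>
        if PySem.Str.isIn term text_lower then a ++ [term] else a) acc) []
  PySem.List.sorted (PySem.Set.ofList found_terms) (fun x => x)

-- ===== PORT B =====
def extract_political_terms_py_alt (texts : List String) : List String :=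
  let combined := PySem.Str.lower (PySem.Str.join " " texts)
  let found := pvKeywords.filter (fun t => PySem.Str.isIn t combined)
  PySem.List.sorted (PySem.Set.ofList found) (fun x => x)

-- ===== PRECONDITION & SPEC =====
def Spec_extract_political_terms_py (texts : List String) (out : List String) : Prop := out = extract_political_terms_py_alt texts
instance (texts : List String) (out : List String) : Decidable (Spec_extract_political_terms_py texts out) := by unfold Spec_extract_political_terms_py; infer_instance

-- ===== CLAIM (what is proved, stated in full; the proofs are below) =====
def Claim_equal_extract_political_terms_py : Prop := ∀ (texts : List String), Dom_extract_political_terms_py texts → Spec_extract_political_terms_py texts (extract_political_terms_py texts)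

-- ===== LEMMAS AND PROOFS =====

-- a space-free pattern that is a prefix of `x ++ ' ' :: y` is already a prefix of `x`
theorem pv_prefix_split (kw : List Char) (hs : ' ' ∉ kw) :
    ∀ (x y : List Char), kw <+: x ++ ' ' :: y → kw <+: x := by
  induction kw with
  | nil => intro x y _; exact List.nil_prefix
  | cons a k ih =>
    intro x y h
    cases x with
    | nil =>
      rcases List.cons_prefix_cons.mp h with ⟨ha, _⟩
      exact absurd (ha ▸ List.mem_cons_self) hs
    | cons c x' =>
      rcases List.cons_prefix_cons.mp h with ⟨ha, hk⟩
      exact ha ▸ List.cons_prefix_cons.mpr ⟨rfl, ih (fun m => hs (List.mem_cons_of_mem a m)) x' y hk⟩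

-- a space-free infix of `x ++ ' ' :: y` lies inside `x` or inside `y`
theorem pv_infix_split (kw : List Char) (hs : ' ' ∉ kw) :
    ∀ (x y : List Char), (kw <:+: x ++ ' ' :: y ↔ kw <:+: x ∨ kw <:+: y) := by
  intro x y
  constructor
  · intro h
    induction x with
    | nil =>
      rcases List.infix_cons_iff.mp h with hp | hi
      · cases kw with
        | nil => exact Or.inl (List.nil_infix)
        | cons a k =>
          rcases List.cons_prefix_cons.mp hp with ⟨ha, _⟩
          exact absurd (ha ▸ List.mem_cons_self) hs
      · exact Or.inr hi
    | cons c x' ih =>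
      rcases List.infix_cons_iff.mp h with hp | hi
      · exact Or.inl (pv_prefix_split kw hs (c :: x') y hp).isInfix
      · rcases ih hi with h1 | h2
        · exact Or.inl (List.infix_cons h1)
        · exact Or.inr h2
  · rintro (h | h)
    · exact h.trans ⟨[], ' ' :: y, rfl⟩
    · exact h.trans ⟨x ++ [' '], [], by simp⟩

-- a nonempty space-free pattern is an infix of the space-intercalation iff it is an infix of a part
theorem pv_infix_intercalate (kw : List Char) (hne : kw ≠ []) (hs : ' ' ∉ kw) :
    ∀ (parts : List (List Char)),
      (kw <:+: List.intercalate [' '] parts ↔ ∃ p ∈ parts, kw <:+: p) := by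
  intro parts
  induction parts with
  | nil => simp [List.intercalate, List.eq_nil_of_infix_nil, hne]
  | cons p rest ih =>
    cases rest with
    | nil => simp [List.intercalate]
    | cons q t =>
      have hcc : List.intercalate [' '] (p :: q :: t) = p ++ ' ' :: List.intercalate [' '] (q :: t) := by
        simp [List.intercalate]
      rw [hcc, pv_infix_split kw hs, ih]
      constructor
      · rintro (h | ⟨r, hr, h⟩)
        · exact ⟨p, by simp, h⟩
        · exact ⟨r, by simp [hr], h⟩
      · rintro ⟨r, hr, h⟩
        rcases List.mem_cons.mp hr with rfl | hr
        · exact Or.inl h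
        · exact Or.inr ⟨r, hr, h⟩

-- mapping a character function that fixes ' ' through a space-intercalation
theorem pv_map_intercalate (parts : List (List Char)) :
    List.map PySem.Chars.lowerChar (List.intercalate [' '] parts) =
      List.intercalate [' '] (parts.map (List.map PySem.Chars.lowerChar)) := by
  induction parts with
  | nil => simp [List.intercalate]
  | cons p rest ih =>
    cases rest with
    | nil => simp [List.intercalate]
    | cons q t =>
      have hcc : ∀ (x y : List Char) (r : List (List Char)),
          List.intercalate [' '] (x :: y :: r) = x ++ ' ' :: List.intercalate [' '] (y :: r) := by
        intro x y r; simp [List.intercalate]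
      simp only [hcc, List.map_append, List.map_cons, ih,
        (by decide : PySem.Chars.lowerChar ' ' = ' ')]

-- lowering commutes with the space-join (the separator is its own lowercase)
theorem pv_lower_join (texts : List String) :
    PySem.Chars.lower (PySem.Chars.join [' '] (texts.map String.toList)) =
      List.intercalate [' '] (texts.map (fun t => PySem.Chars.lower t.toList)) := by
  simp only [PySem.Chars.join, PySem.Chars.lower, pv_map_intercalate, List.map_map]
  rfl

-- every keyword is nonempty and space-free
set_option maxHeartbeats 2000000 in
theorem pv_keywords_ok : ∀ kw ∈ pvKeywords, kw.toList ≠ [] ∧ ' ' ∉ kw.toList := by decide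

-- a keyword occurs in the lowercased space-join iff it occurs in some lowercased text
theorem pv_isIn_join (kw : String) (hkw : kw ∈ pvKeywords) (texts : List String) :
    (PySem.Str.isIn kw (PySem.Str.lower (PySem.Str.join " " texts)) = true ↔
      ∃ t ∈ texts, PySem.Str.isIn kw (PySem.Str.lower t) = true) := by
  obtain ⟨hne, hs⟩ := pv_keywords_ok kw hkw
  rw [PySem.Str.isIn_iff_infix]
  have hL : (PySem.Str.lower (PySem.Str.join " " texts)).toList =
      List.intercalate [' '] (texts.map (fun t => PySem.Chars.lower t.toList)) := by
    simp [pysem, PySem.Str.lower, PySem.Str.join]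
    exact pv_lower_join texts
  rw [hL, pv_infix_intercalate kw.toList hne hs]
  constructor
  · rintro ⟨p, hp, h⟩
    rcases List.mem_map.mp hp with ⟨t, ht, rfl⟩
    exact ⟨t, ht, by rw [PySem.Str.isIn_iff_infix]; simpa [pysem, PySem.Str.lower] using h⟩
  · rintro ⟨t, ht, h⟩
    rw [PySem.Str.isIn_iff_infix] at h
    exact ⟨PySem.Chars.lower t.toList, List.mem_map.mpr ⟨t, ht, rfl⟩,
      by simpa [pysem, PySem.Str.lower] using h⟩

-- membership in A's accumulated `found_terms`
set_option maxHeartbeats 1000000 in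
theorem pv_mem_foundA (texts : List String) (a : String) :
    (a ∈ texts.foldl (fun acc text =>
        let text_lower := PySem.Str.lower text
        pvKeywords.foldl (fun acc2 term =>
          if PySem.Str.isIn term text_lower then acc2 ++ [term] else acc2) acc) [] ↔
      a ∈ pvKeywords ∧ ∃ t ∈ texts, PySem.Str.isIn a (PySem.Str.lower t) = true) := by
  have hin : ∀ (text : String) (acc : List String),
      pvKeywords.foldl (fun acc2 term =>
        if PySem.Str.isIn term (PySem.Str.lower text) then acc2 ++ [term] else acc2) acc =
      acc ++ (pvKeywords.filter (fun term => PySem.Str.isIn term (PySem.Str.lower text))).map id :=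
    fun text acc =>
      PySem.List.foldl_append_if (fun term => PySem.Str.isIn term (PySem.Str.lower text)) id pvKeywords acc
  simp only [hin, List.map_id]
  rw [PySem.List.foldl_append_eq_flatMap
      (fun text => pvKeywords.filter (fun term => PySem.Str.isIn term (PySem.Str.lower text))) texts []]
  simp only [List.nil_append, List.mem_flatMap, List.mem_filter]
  tauto

-- ===== VERDICT (by name: the statement is the Claim_ definition above) =====
theorem extract_political_terms_py_spec : Claim_equal_extract_political_terms_py := by
  intro texts _
  unfold Spec_extract_political_terms_py extract_political_terms_py extract_political_terms_py_alt
  apply PySem.List.sorted_eq_sorted_of_perm _ _ _ (fun _ _ h => h)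
  rw [List.perm_ext_iff_of_nodup (PySem.Set.nodup_ofList _) (PySem.Set.nodup_ofList _)]
  intro a
  rw [PySem.Set.mem_ofList, PySem.Set.mem_ofList, pv_mem_foundA, List.mem_filter]
  constructor
  · rintro ⟨hk, ht⟩
    exact ⟨hk, (pv_isIn_join a hk texts).mpr ht⟩
  · rintro ⟨hk, hc⟩
    exact ⟨hk, (pv_isIn_join a hk texts).mp hc⟩
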